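-- pv_equiv track=rewrite | github.com/shasankp000/Lexis | compression/pipeline/stage5_encode.py | _encode_factoradic_unsigned
-- ===== SOURCE A (Python) =====
-- from typing import Dict, List, Tuple, TypedDict
--
-- def _encode_factoradic_unsigned(value: int) -> List[int]:
--     """Encode a non-negative integer into factoriadic digits."""
--     if value < 0:
--         raise ValueError("value must be non-negative")
--     if value == 0:
--         return [0]
--     digits: List[int] = []
--     base = 1
--     n = value
--     while n > 0:
--         n, rem = divmod(n, base)
--         digits.append(rem)
--         base += 1
--     return list(reversed(digits))
-- ===== SOURCE B (Python) =====
-- def _encode_factoradic_unsigned(value: int) -> list: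
--     """Encode a non-negative integer into factoriadic digits (MSB-first, no reversal)."""
--     if value < 0:
--         raise ValueError("value must be non-negative")
--     if value == 0:
--         return [0]
--     # largest m with factorial(m) <= value, keeping f = factorial(m)
--     m, f = 0, 1
--     while f * (m + 1) <= value:
--         m += 1
--         f *= m
--     digits = []
--     v = value
--     i = m
--     while True:
--         digits.append(v // f)
--         if i == 0:
--             break
--         v %= f
--         f //= i
--         i -= 1
--     return digits
-- ===== Notes on version B (the rewrite author's own statement) =====
-- stated objective: alternative
-- what changed: B first finds the top factorial place by multiplying up a running factorial, then emits digits MSB-first by dividing/modding by decreasing factorials, instead of A's LSB-first divmod loop with incrementing base followed by a final reversal; Pre_ excludes negative value, where A raises ValueError.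
import Mathlib
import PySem

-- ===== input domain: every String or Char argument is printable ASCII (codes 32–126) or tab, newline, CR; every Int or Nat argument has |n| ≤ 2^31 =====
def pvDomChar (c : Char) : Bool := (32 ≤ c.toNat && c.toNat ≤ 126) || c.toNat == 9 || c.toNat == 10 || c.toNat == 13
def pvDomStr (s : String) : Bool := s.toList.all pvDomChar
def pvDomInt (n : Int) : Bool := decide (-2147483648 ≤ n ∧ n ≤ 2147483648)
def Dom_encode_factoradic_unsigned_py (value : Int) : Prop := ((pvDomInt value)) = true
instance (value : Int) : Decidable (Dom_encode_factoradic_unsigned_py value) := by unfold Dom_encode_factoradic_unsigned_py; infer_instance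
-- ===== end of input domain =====

-- B finds the top factorial place first and emits digits MSB-first by dividing by
-- decreasing factorials, instead of A's LSB-first incrementing-base divmod loop + reversal.

-- ===== PORT A =====
-- A's while loop: repeated divmod by an incrementing base, collecting remainders LSB-first.
-- Values are nonnegative throughout (guarded by value < 0 / value == 0 branches), so the
-- loop is ported on Nat; Python's divmod on nonnegative operands is Nat division/modulo.
def pvALoop (n base : Nat) : List Nat :=
  if h : n = 0 then []
  else (n % base) :: pvALoop (n / base) (base + 1)
termination_by 2 * n + (if base ≤ 1 then 1 else 0)
decreasing_by
  rcases Nat.lt_or_ge base 2 with hb | hb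
  · interval_cases base <;> (simp_all; try omega)
  · have h1 : n / base < n := Nat.div_lt_self (Nat.pos_of_ne_zero h) (by omega)
    split <;> omega

def encode_factoradic_unsigned_py (value : Int) : List Int :=
  if value < 0 then []        -- Python raises ValueError here; excluded by Pre_
  else if value = 0 then [0]
  else ((pvALoop value.toNat 1).reverse).map Int.ofNat

-- ===== PORT B =====
-- find largest m with m! ≤ v, maintaining f = m! by multiplication (the 0 < f argument
-- only justifies termination; it is the loop's invariant f = m! ≥ 1)
def pvFindM (m f v : Nat) (hf : 0 < f) : Nat × Nat :=
  if h : f * (m + 1) ≤ v then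
    pvFindM (m + 1) (f * (m + 1)) v (by positivity)
  else (m, f)
termination_by v - m
decreasing_by
  have : m + 1 ≤ f * (m + 1) := Nat.le_mul_of_pos_left _ hf
  omega

-- MSB-first digit loop: append v // f, then f //= i, i -= 1, stopping after i = 0
def pvBLoop (i f v : Nat) : List Nat :=
  (v / f) :: (match i with
    | 0 => []
    | i' + 1 => pvBLoop i' (f / (i' + 1)) (v % f))

def encode_factoradic_unsigned_py_alt (value : Int) : List Int :=
  if value < 0 then []        -- raises ValueError; excluded by Pre_
  else if value = 0 then [0]
  else
    let p := pvFindM 0 1 value.toNat (by norm_num)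
    (pvBLoop p.1 p.2 value.toNat).map Int.ofNat

-- ===== PRECONDITION & SPEC =====
-- A raises ValueError exactly on negative input.
def Pre_encode_factoradic_unsigned_py (value : Int) : Prop := 0 ≤ value
instance (value : Int) : Decidable (Pre_encode_factoradic_unsigned_py value) := by
  unfold Pre_encode_factoradic_unsigned_py; infer_instance

def pvWitness_encode_factoradic_unsigned_py : Int := 7

def Spec_encode_factoradic_unsigned_py (value : Int) (out : List Int) : Prop := out = encode_factoradic_unsigned_py_alt value
instance (value : Int) (out : List Int) : Decidable (Spec_encode_factoradic_unsigned_py value out) := by unfold Spec_encode_factoradic_unsigned_py; infer_instance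

-- ===== CLAIM (what is proved, stated in full; the proofs are below) =====
def Claim_equal_encode_factoradic_unsigned_py : Prop := ∀ (value : Int), Dom_encode_factoradic_unsigned_py value → Pre_encode_factoradic_unsigned_py value → Spec_encode_factoradic_unsigned_py value (encode_factoradic_unsigned_py value)

-- ===== LEMMAS AND PROOFS =====

-- generalized rising factorial: gfact b L = b * (b+1) * ... * (b+L-1)
def gfact (b : Nat) : Nat → Nat
  | 0 => 1
  | L + 1 => gfact b L * (b + L)

-- MSB-first generalized factoradic spec
def gspec (b : Nat) : Nat → Nat → List Nat
  | 0, v => [v]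
  | L + 1, v => (v / gfact b (L + 1)) :: gspec b L (v % gfact b (L + 1))

theorem gfact_pos (b : Nat) (hb : 0 < b) : ∀ L, 0 < gfact b L := by
  intro L; induction L with
  | zero => simp [gfact]
  | succ L ih => simp only [gfact]; positivity

theorem gfact_shift (b : Nat) : ∀ L, gfact b (L + 1) = b * gfact (b + 1) L := by
  intro L; induction L with
  | zero => simp [gfact]
  | succ L ih =>
    show gfact b (L + 1) * (b + (L + 1)) = b * (gfact (b + 1) L * (b + 1 + L))
    rw [ih]; ring

theorem gspec_shift (b : Nat) (hb : 0 < b) :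
    ∀ L v, gspec b (L + 1) v = gspec (b + 1) L (v / b) ++ [v % b] := by
  intro L
  induction L generalizing b with
  | zero =>
    intro v
    simp [gspec, gfact]
  | succ L ih =>
    intro v
    have hsh : gfact b (L + 2) = b * gfact (b + 1) (L + 1) := gfact_shift b (L + 1)
    have h1 : v / gfact b (L + 2) = v / b / gfact (b + 1) (L + 1) := by
      rw [hsh, Nat.div_div_eq_div_mul]
    have h2 : (v % gfact b (L + 2)) / b = (v / b) % gfact (b + 1) (L + 1) := by
      rw [hsh, Nat.mul_comm, Nat.mod_mul_left_div_self]
    have h3 : (v % gfact b (L + 2)) % b = v % b := by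
      rw [hsh]; exact Nat.mod_mod_of_dvd v ⟨gfact (b + 1) (L + 1), rfl⟩
    show (v / gfact b (L + 2)) :: gspec b (L + 1) (v % gfact b (L + 2)) = _
    rw [ih b hb (v % gfact b (L + 2)), h1, h2, h3]
    rfl

theorem aLoop_spec :
    ∀ L b n, 0 < b → gfact b L ≤ n → n < gfact b (L + 1) →
      (pvALoop n b).reverse = gspec b L n := by
  intro L
  induction L with
  | zero =>
    intro b n hb h1 h2
    simp only [gfact] at h1 h2
    have hn : n ≠ 0 := by omega
    have hnb : n < b := by simpa using h2
    rw [pvALoop, dif_neg hn]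
    have : n / b = 0 := Nat.div_eq_of_lt hnb
    rw [this, pvALoop, dif_pos rfl]
    simp [gspec, Nat.mod_eq_of_lt hnb]
  | succ L ih =>
    intro b n hb h1 h2
    have hsh : gfact b (L + 1) = b * gfact (b + 1) L := gfact_shift b L
    have hsh2 : gfact b (L + 2) = b * gfact (b + 1) (L + 1) := gfact_shift b (L + 1)
    have hgpos := gfact_pos (b + 1) (by omega) L
    have hn : n ≠ 0 := by nlinarith [gfact_pos b hb (L + 1)]
    have hlo : gfact (b + 1) L ≤ n / b := by
      rw [Nat.le_div_iff_mul_le hb]; rw [hsh] at h1; nlinarith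
    have hhi : n / b < gfact (b + 1) (L + 1) := by
      rw [Nat.div_lt_iff_lt_mul hb]; rw [hsh2] at h2; nlinarith
    rw [pvALoop, dif_neg hn]
    simp only [List.reverse_cons]
    rw [ih (b + 1) (n / b) (by omega) hlo hhi]
    rw [gspec_shift b hb L n]

theorem bLoop_spec : ∀ i v, pvBLoop i (gfact 1 i) v = gspec 1 i v := by
  intro i
  induction i with
  | zero => intro v; simp [pvBLoop, gspec, gfact]
  | succ i ih =>
    intro v
    have : gfact 1 (i + 1) / (i + 1) = gfact 1 i := by
      show gfact 1 i * (1 + i) / (i + 1) = gfact 1 i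
      rw [Nat.add_comm 1 i, Nat.mul_div_cancel _ (by omega)]
    rw [pvBLoop, this, ih]
    rfl

theorem findM_spec :
    ∀ v m f (hf : 0 < f), f = gfact 1 m → f ≤ v →
      ∃ m', pvFindM m f v hf = (m', gfact 1 m') ∧
        gfact 1 m' ≤ v ∧ v < gfact 1 (m' + 1) := by
  intro v m f hf
  fun_induction pvFindM m f v hf with
  | case1 m f v h ih =>
    intro hfe hle
    have hfe' : f * (m + 1) = gfact 1 (m + 1) := by
      show _ = gfact 1 m * (1 + m); rw [hfe]; ring
    exact ih (by rw [hfe']) (by omega)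
  | case2 m f v h =>
    intro hfe hle
    refine ⟨m, by rw [hfe], by omega, ?_⟩
    have : gfact 1 (m + 1) = f * (m + 1) := by
      show gfact 1 m * (1 + m) = _; rw [hfe]; ring
    omega

-- ===== VERDICT (by name: the statement is the Claim_ definition above) =====
theorem encode_factoradic_unsigned_py_spec : Claim_equal_encode_factoradic_unsigned_py := by
  intro value _ hpre
  unfold Spec_encode_factoradic_unsigned_py
  unfold encode_factoradic_unsigned_py encode_factoradic_unsigned_py_alt
  have hnneg : ¬ value < 0 := by exact not_lt.mpr hpre
  rw [if_neg hnneg, if_neg hnneg]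
  by_cases h0 : value = 0
  · rw [if_pos h0, if_pos h0]
  · rw [if_neg h0, if_neg h0]
    have hv : 1 ≤ value.toNat := by omega
    obtain ⟨m', heq, hlo, hhi⟩ := findM_spec value.toNat 0 1 (by norm_num) rfl hv
    simp only [heq]
    rw [bLoop_spec m' value.toNat,
        aLoop_spec m' 1 value.toNat (by norm_num) hlo hhi]
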